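-- pv_equiv track=rewrite | github.com/codechizel/votescraper | analysis/05_clustering/clustering.py | _build_display_labels
-- ===== SOURCE A (Python) =====
-- def _build_display_labels(full_names: list[str]) -> dict[str, str]:
--     """Build a mapping from full_name → short display label for plot annotations.
--
--     Handles two problems:
--       1. Leadership suffixes like " - Vice President of the Senate" are stripped
--          before extracting the last name.
--       2. Duplicate last names (e.g., two Claeys, two Smith) get disambiguated
--          with a first-name initial (e.g., "J.R. Claeys" vs "Jo. Claeys").
--     """
--     from collections import Counter
--
--     def _clean_name(name: str) -> str:
--         """Strip leadership suffix: 'Tim Shallenburger - Vice President...' → 'Tim Shallenburger'"""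
--         return name.split(" - ")[0]
--
--     def _last_name(clean: str) -> str:
--         return clean.split()[-1] if clean else "?"
--
--     # First pass: count last names to detect duplicates
--     cleaned = {name: _clean_name(name) for name in full_names}
--     last_names = {name: _last_name(c) for name, c in cleaned.items()}
--     last_counts = Counter(last_names.values())
--
--     # Second pass: build labels, disambiguating duplicates with first name
--     labels: dict[str, str] = {}
--     for name in full_names:
--         clean = cleaned[name]
--         last = last_names[name]
--         if last_counts[last] > 1:
--             # Include first name for disambiguation
--             parts = clean.split()
--             first = parts[0] if parts else ""
--             # Abbreviate first name if long: "Joseph" → "Jo.", "J.R." stays as-is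
--             if len(first) > 3 and "." not in first:
--                 first = first[:2] + "."
--             labels[name] = f"{first} {last}"
--         else:
--             labels[name] = last
--
--     return labels
-- ===== SOURCE B (Python) =====
-- def _build_display_labels(full_names: list[str]) -> dict[str, str]:
--     """Same mapping, built by GROUPING unique names by last name instead of counting.
--
--     Groups: last_name -> list of unique full names. A singleton group needs no
--     disambiguation; a larger group gets first-name labels. Finally the labels
--     are listed in the input's first-occurrence order.
--     """
--
--     def _clean(name: str) -> str:
--         return name.split(" - ")[0]
--
--     groups: dict[str, list[str]] = {}
--     for name in dict.fromkeys(full_names):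
--         parts = _clean(name).split()
--         last = parts[-1] if parts else "?"
--         groups.setdefault(last, []).append(name)
--
--     labels: dict[str, str] = {}
--     for last, members in groups.items():
--         if len(members) == 1:
--             labels[members[0]] = last
--         else:
--             for name in members:
--                 first = (_clean(name).split() or [""])[0]
--                 if len(first) > 3 and "." not in first:
--                     first = first[:2] + "."
--                 labels[name] = f"{first} {last}"
--
--     return {name: labels[name] for name in full_names}
-- ===== Notes on version B (the rewrite author's own statement) =====
-- stated objective: alternative
-- what changed: B replaces A's per-name Counter lookup by a group-by data structure (last_name -> list of unique full names): singleton groups emit the bare last name, larger groups emit disambiguated first-name labels per member, and the result is re-listed in input order.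
import Mathlib
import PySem

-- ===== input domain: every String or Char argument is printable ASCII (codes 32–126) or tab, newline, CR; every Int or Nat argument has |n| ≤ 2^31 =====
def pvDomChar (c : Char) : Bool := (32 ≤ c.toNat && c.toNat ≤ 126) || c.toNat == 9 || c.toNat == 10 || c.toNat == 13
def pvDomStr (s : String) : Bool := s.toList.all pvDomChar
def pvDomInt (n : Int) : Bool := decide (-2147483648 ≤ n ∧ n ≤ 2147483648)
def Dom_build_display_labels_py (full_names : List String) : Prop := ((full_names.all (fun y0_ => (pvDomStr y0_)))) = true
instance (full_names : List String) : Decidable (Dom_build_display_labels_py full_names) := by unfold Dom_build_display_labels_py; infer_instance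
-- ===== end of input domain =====

-- B replaces A's Counter of last names by a group-by dict (last name → unique full names),
-- emitting labels per group (objective: alternative decomposition; not claimed faster).

-- ===== PORT A =====
-- name.split(" - ")[0]
def pvCleanA (name : String) : String := ((PySem.Str.split? name " - ").getD []).headD ""
-- clean.split()[-1] if clean else "?"  (the [-1] raises IndexError when clean is nonempty whitespace; excluded by Pre_)
def pvLastA (clean : String) : String :=
  if clean ≠ "" then (PySem.List.pyGet? (PySem.Str.split₀ clean) (-1)).getD "?" else "?"

def build_display_labels_py (full_names : List String) : List (String × String) :=
  let cleaned : PySem.Dict String String :=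
    full_names.foldl (fun d name => d.insert name (pvCleanA name)) PySem.Dict.empty
  let last_names : PySem.Dict String String :=
    cleaned.items.foldl (fun d p => d.insert p.1 (pvLastA p.2)) PySem.Dict.empty
  let last_counts : PySem.Dict String Int := PySem.Dict.counter last_names.values
  let labels : PySem.Dict String String :=
    full_names.foldl (fun d name =>
      let clean := cleaned.getD name ""
      let last := last_names.getD name ""
      if 1 < last_counts.getD last 0 then
        let parts := PySem.Str.split₀ clean
        let first := parts.headD ""
        let first := if 3 < PySem.Str.len first ∧ PySem.Str.isIn "." first = false
          then PySem.Str.join "" [PySem.Str.slice first none (some 2), "."] else first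
        d.insert name (PySem.Str.join " " [first, last])
      else
        d.insert name last) PySem.Dict.empty
  labels.items

-- ===== PORT B =====
-- _clean: name.split(" - ")[0]
def pvCleanB (name : String) : String := ((PySem.Str.split? name " - ").getD []).headD ""
-- parts[-1] if parts else "?"
def pvLastB (name : String) : String :=
  let parts := PySem.Str.split₀ (pvCleanB name)
  if parts ≠ [] then (PySem.List.pyGet? parts (-1)).getD "?" else "?"
-- the disambiguated label f"{first} {last}" of the multi-member branch
def pvDisB (name last : String) : String :=
  let first := (PySem.Str.split₀ (pvCleanB name)).headD ""
  let first := if 3 < PySem.Str.len first ∧ PySem.Str.isIn "." first = false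
    then PySem.Str.join "" [PySem.Str.slice first none (some 2), "."] else first
  PySem.Str.join " " [first, last]

def build_display_labels_py_alt (full_names : List String) : List (String × String) :=
  let groups : PySem.Dict String (List String) :=
    (PySem.List.dedup full_names).foldl
      (fun g name => g.modify (pvLastB name) [] (· ++ [name])) PySem.Dict.empty
  let labels : PySem.Dict String String :=
    groups.items.foldl (fun d p =>
      if p.2.length = 1 then d.insert (p.2.headD "") p.1   -- members[0]; group lists are never empty
      else p.2.foldl (fun d name => d.insert name (pvDisB name p.1)) d) PySem.Dict.empty
  (full_names.foldl (fun d name => d.insert name (labels.getD name "")) PySem.Dict.empty).items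

-- ===== PRECONDITION & SPEC =====
-- Pre_ excludes inputs containing a name whose part before " - " is nonempty but all
-- whitespace: there A's clean.split()[-1] raises IndexError (A returns on everything
-- else; B returns a dict labelling such a name "?").
def Pre_build_display_labels_py (full_names : List String) : Prop :=
  ∀ name ∈ full_names,
    ((PySem.Str.split? name " - ").getD []).headD "" = "" ∨
    PySem.Str.split₀ (((PySem.Str.split? name " - ").getD []).headD "") ≠ []
instance (full_names : List String) : Decidable (Pre_build_display_labels_py full_names) := by
  unfold Pre_build_display_labels_py; infer_instance

def pvWitness_build_display_labels_py : List String :=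
  ["Joseph Claeys", "J.R. Claeys", "Tim S - Vice President", ""]

def Spec_build_display_labels_py (full_names : List String) (out : List (String × String)) : Prop :=
  out = build_display_labels_py_alt full_names
instance (full_names : List String) (out : List (String × String)) : Decidable (Spec_build_display_labels_py full_names out) := by
  unfold Spec_build_display_labels_py; infer_instance

-- ===== CLAIM (what is proved, stated in full; the proofs are below) =====
def Claim_equal_build_display_labels_py : Prop :=
  ∀ (full_names : List String), Dom_build_display_labels_py full_names →
    Pre_build_display_labels_py full_names →
    Spec_build_display_labels_py full_names (build_display_labels_py full_names)

-- ===== LEMMAS AND PROOFS =====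

-- a fold of key-function inserts never touches keys outside the list
lemma getD_foldl_insert_fn_not_mem {ν : Type} (l : List String) (f : String → ν)
    (d : PySem.Dict String ν) (x : String) (d0 : ν) (hx : x ∉ l) :
    (l.foldl (fun d n => d.insert n (f n)) d).getD x d0 = d.getD x d0 := by
  induction l generalizing d with
  | nil => rfl
  | cons a l ih =>
    simp only [List.foldl_cons]
    rw [ih _ (fun h => hx (List.mem_cons_of_mem _ h)),
        PySem.Dict.getD_insert_of_ne _ _ _ (by intro h; exact hx (h ▸ List.mem_cons_self))]

-- a fold of key-function inserts stores f n at every listed key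
lemma getD_foldl_insert_fn_mem {ν : Type} (l : List String) (f : String → ν)
    (d : PySem.Dict String ν) (x : String) (d0 : ν) (hx : x ∈ l) :
    (l.foldl (fun d n => d.insert n (f n)) d).getD x d0 = f x := by
  induction l generalizing d with
  | nil => cases hx
  | cons a l ih =>
    simp only [List.foldl_cons]
    by_cases h : x ∈ l
    · exact ih _ h
    · have hax : x = a := by rcases List.mem_cons.mp hx with h' | h'; exact h'; exact absurd h' h
      subst hax
      rw [getD_foldl_insert_fn_not_mem l f _ x d0 h, PySem.Dict.getD_insert_self]

-- items of a key-function insert fold from empty: one pair per distinct key, in first-occurrence order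
lemma items_foldl_insert_fn {ν : Type} [Inhabited ν] (l : List String) (f : String → ν) :
    (l.foldl (fun d n => d.insert n (f n)) PySem.Dict.empty).items
      = (PySem.List.dedup l).map (fun n => (n, f n)) := by
  have hk : (l.foldl (fun d n => d.insert n (f n)) PySem.Dict.empty).keys = PySem.List.dedup l := by
    rw [PySem.Dict.keys_foldl_insert l (fun _ n => f n) PySem.Dict.empty]
    simp [PySem.Dict.keys_empty, PySem.Set.update_nil_left]
  have hnd : (l.foldl (fun d n => d.insert n (f n)) PySem.Dict.empty).keys.Nodup := by
    rw [hk]; exact PySem.List.nodup_dedup l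
  rw [PySem.Dict.items_eq_map_keys _ hnd default, hk]
  refine List.map_congr_left ?_
  intro n hn
  rw [getD_foldl_insert_fn_mem l f PySem.Dict.empty n default
      ((PySem.List.mem_dedup l n).mp hn)]

-- the per-name label both programs compute (proof-only abbreviation)
def pvLastOf (n : String) : String := pvLastA (pvCleanA n)

def pvLabelOf (fn : List String) (n : String) : String :=
  let last := pvLastOf n
  if 1 < ((PySem.List.dedup fn).map pvLastOf).count last then
    let parts := PySem.Str.split₀ (pvCleanA n)
    let first := parts.headD ""
    let first := if 3 < PySem.Str.len first ∧ PySem.Str.isIn "." first = false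
      then PySem.Str.join "" [PySem.Str.slice first none (some 2), "."] else first
    PySem.Str.join " " [first, last]
  else last

lemma dedup_dedup (l : List String) :
    PySem.List.dedup (PySem.List.dedup l) = PySem.List.dedup l := by
  simp [PySem.Set.ofList_eq_self_of_nodup _ (PySem.Set.nodup_ofList l)]

-- under Pre_'s per-name disjunct, B's last-name rule agrees with A's
lemma lastB_eq (n : String)
    (h : ((PySem.Str.split? n " - ").getD []).headD "" = "" ∨
      PySem.Str.split₀ (((PySem.Str.split? n " - ").getD []).headD "") ≠ []) :
    pvLastB n = pvLastOf n := by
  have hcl : pvCleanB n = pvCleanA n := rfl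
  rw [show (((PySem.Str.split? n " - ").getD []).headD "" : String) = pvCleanA n from rfl] at h
  simp only [pvLastB, pvLastOf, pvLastA, hcl]
  by_cases he : pvCleanA n = ""
  · rw [he]; simp [show PySem.Str.split₀ "" = [] from by decide]
  · rcases h with h | h
    · exact absurd h he
    · rw [if_pos h, if_pos he]

lemma A_eq (fn : List String) :
    build_display_labels_py fn = (PySem.List.dedup fn).map (fun n => (n, pvLabelOf fn n)) := by
  simp only [build_display_labels_py]
  rw [PySem.List.foldl_congr_mem fn _ (fun d name => d.insert name (pvLabelOf fn name))
      PySem.Dict.empty ?_]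
  · exact items_foldl_insert_fn fn _
  intro d name hname
  have hc : (fn.foldl (fun d name => d.insert name (pvCleanA name)) PySem.Dict.empty).getD name ""
      = pvCleanA name := getD_foldl_insert_fn_mem fn pvCleanA _ name "" hname
  have hLN : ((fn.foldl (fun d name => d.insert name (pvCleanA name)) PySem.Dict.empty).items.foldl
        (fun d p => d.insert p.1 (pvLastA p.2)) PySem.Dict.empty)
      = (PySem.List.dedup fn).foldl (fun d n => d.insert n (pvLastOf n)) PySem.Dict.empty := by
    rw [items_foldl_insert_fn fn pvCleanA, List.foldl_map]; rfl
  have hl : ((fn.foldl (fun d name => d.insert name (pvCleanA name)) PySem.Dict.empty).items.foldl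
        (fun d p => d.insert p.1 (pvLastA p.2)) PySem.Dict.empty).getD name ""
      = pvLastOf name := by
    rw [hLN]
    exact getD_foldl_insert_fn_mem _ pvLastOf _ name ""
      ((PySem.List.mem_dedup fn name).mpr hname)
  have hvals : ((fn.foldl (fun d name => d.insert name (pvCleanA name)) PySem.Dict.empty).items.foldl
        (fun d p => d.insert p.1 (pvLastA p.2)) PySem.Dict.empty).values
      = (PySem.List.dedup fn).map pvLastOf := by
    rw [hLN]
    show ((PySem.List.dedup fn).foldl (fun d n => d.insert n (pvLastOf n)) PySem.Dict.empty).items.map Prod.snd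
      = (PySem.List.dedup fn).map pvLastOf
    rw [items_foldl_insert_fn _ pvLastOf, dedup_dedup, List.map_map]
    rfl
  rw [hc, hl, hvals]
  simp only [PySem.Dict.getD_counter, pvLabelOf]
  by_cases hgt : 1 < List.count (pvLastOf name) ((PySem.List.dedup fn).map pvLastOf)
  · rw [if_pos (by exact_mod_cast hgt), if_pos hgt]
  · rw [if_neg (by exact_mod_cast hgt), if_neg hgt]

-- B's per-name label, written over B's own last-name rule (proof-only abbreviation)
def pvLabBOf (fn : List String) (n : String) : String :=
  if 1 < ((PySem.List.dedup fn).map pvLastB).count (pvLastB n) then pvDisB n (pvLastB n)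
  else pvLastB n

lemma B_eq (fn : List String) :
    build_display_labels_py_alt fn
      = (PySem.List.dedup fn).map (fun n => (n, pvLabBOf fn n)) := by
  simp only [build_display_labels_py_alt]
  have hmap := List.foldl_map (f := fun n : String => ((pvLastB n, n) : String × String))
      (g := fun (g : PySem.Dict String (List String)) p => g.modify p.1 [] (· ++ [p.2]))
      (l := PySem.List.dedup fn) (init := (PySem.Dict.empty : PySem.Dict String (List String)))
  set U := PySem.List.dedup fn with hU
  set G := U.foldl (fun g name => g.modify (pvLastB name) [] (· ++ [name]))
      (PySem.Dict.empty : PySem.Dict String (List String)) with hG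
  have hGd : ∀ L, G.getD L [] = U.filter (fun n => pvLastB n == L) := by
    intro L
    rw [← hmap, PySem.Dict.getD_foldl_modify_append]
    simp [List.filter_map, Function.comp_def, List.map_map]
  have hkeys : G.keys = PySem.List.dedup (U.map pvLastB) := by
    rw [hG, PySem.Dict.keys_foldl_modify_key]
    simp [PySem.Dict.keys_empty, PySem.Set.update_nil_left]
  have hnd : G.keys.Nodup := by rw [hkeys]; exact PySem.List.nodup_dedup _
  have hitems : G.items = G.keys.map (fun L => (L, G.getD L [])) :=
    PySem.Dict.items_eq_map_keys G hnd []
  have hcnt : ∀ L, (U.map pvLastB).count L = (U.filter (fun n => pvLastB n == L)).length := by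
    intro L
    rw [List.count_eq_countP, List.countP_map, List.countP_eq_length_filter]
    rfl
  have hlab : (G.items.foldl (fun d p =>
        if p.2.length = 1 then d.insert (p.2.headD "") p.1
        else p.2.foldl (fun d name => d.insert name (pvDisB name p.1)) d) PySem.Dict.empty)
      = (G.keys.flatMap (fun L => G.getD L [])).foldl
          (fun d n => d.insert n (pvLabBOf fn n)) PySem.Dict.empty := by
    rw [hitems, List.foldl_map, List.flatMap_def, List.foldl_flatten, List.foldl_map]
    refine PySem.List.foldl_congr_mem _ _ _ _ ?_
    intro d L hL
    have hmemn : ∀ n ∈ G.getD L [], pvLastB n = L := by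
      intro n hn
      rw [hGd L] at hn
      exact eq_of_beq (List.mem_filter.mp hn).2
    have hlen : (U.map pvLastB).count L = (G.getD L []).length := by
      rw [hcnt L, hGd L]
    by_cases h1 : (G.getD L []).length = 1
    · obtain ⟨n0, hn0⟩ := List.length_eq_one_iff.mp h1
      have hL0 : pvLastB n0 = L := hmemn n0 (by rw [hn0]; exact List.mem_singleton.mpr rfl)
      have hnot : ¬ 1 < (U.map pvLastB).count L := by
        rw [hlen, h1]; omega
      have hv : pvLabBOf fn n0 = L := by
        simp only [pvLabBOf, ← hU, hL0]
        rw [if_neg hnot]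
      rw [hn0]
      simp [hv]
    · have hne : G.getD L [] ≠ [] := by
        have hLk : L ∈ PySem.List.dedup (U.map pvLastB) := by rw [← hkeys]; exact hL
        obtain ⟨n, hn, hLn⟩ := List.mem_map.mp ((PySem.List.mem_dedup _ L).mp hLk)
        rw [hGd L]
        intro hnil
        have : n ∈ U.filter (fun n => pvLastB n == L) :=
          List.mem_filter.mpr ⟨hn, by simp [hLn]⟩
        rw [hnil] at this
        cases this
      have h2 : 1 < (U.map pvLastB).count L := by
        rw [hlen]
        have := List.length_pos_iff.mpr hne
        omega
      rw [if_neg h1]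
      refine PySem.List.foldl_congr_mem _ _ _ _ ?_
      intro d' n hn
      have hLn : pvLastB n = L := hmemn n hn
      have hv : pvLabBOf fn n = pvDisB n L := by
        simp only [pvLabBOf, ← hU, hLn, if_pos h2]
      rw [hv]
  rw [hlab]
  have hmemN : ∀ n ∈ U, n ∈ G.keys.flatMap (fun L => G.getD L []) := by
    intro n hn
    refine List.mem_flatMap.mpr ⟨pvLastB n, ?_, ?_⟩
    · rw [hkeys]
      exact (PySem.List.mem_dedup _ _).mpr (List.mem_map.mpr ⟨n, hn, rfl⟩)
    · rw [hGd]
      exact List.mem_filter.mpr ⟨hn, by simp⟩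
  have hget : ∀ n ∈ U, ((G.keys.flatMap (fun L => G.getD L [])).foldl
      (fun d n => d.insert n (pvLabBOf fn n)) PySem.Dict.empty).getD n "" = pvLabBOf fn n :=
    fun n hn => getD_foldl_insert_fn_mem _ _ _ _ _ (hmemN n hn)
  clear_value U G
  subst hU
  rw [items_foldl_insert_fn fn (fun n => ((G.keys.flatMap (fun L => G.getD L [])).foldl
      (fun d n => d.insert n (pvLabBOf fn n)) PySem.Dict.empty).getD n "")]
  exact List.map_congr_left (fun n hn => by rw [hget n hn])

-- under Pre_, B's label rule coincides with A's for every listed name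
lemma labB_eq (fn : List String) (hpre : Pre_build_display_labels_py fn)
    (n : String) (hn : n ∈ PySem.List.dedup fn) : pvLabBOf fn n = pvLabelOf fn n := by
  have hmap : (PySem.List.dedup fn).map pvLastB = (PySem.List.dedup fn).map pvLastOf :=
    List.map_congr_left (fun m hm => lastB_eq m (hpre m ((PySem.List.mem_dedup fn m).mp hm)))
  have hlast : pvLastB n = pvLastOf n :=
    lastB_eq n (hpre n ((PySem.List.mem_dedup fn n).mp hn))
  simp only [pvLabBOf, pvLabelOf, hmap, hlast, pvDisB, pvCleanB, pvCleanA]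

-- ===== VERDICT (by name: the statement is the Claim_ definition above) =====
theorem build_display_labels_py_spec : Claim_equal_build_display_labels_py := by
  intro fn _ hpre
  unfold Spec_build_display_labels_py
  rw [A_eq fn, B_eq fn]
  exact List.map_congr_left (fun n hn => by rw [labB_eq fn hpre n hn])
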